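-- pv_equiv track=rewrite | github.com/avenongrata/Simulate-socket-work | src/host1.py | fun_findout_last_bit
-- ===== SOURCE A (Python) =====
-- def fun_findout_last_bit(bit_string):
-- 	bit_string = bit_string[::-1]
-- 	for bit in bit_string:
-- 		if bit == '1' or bit == '0':
-- 			break
-- 		else:
-- 			bit_string = bit_string[1:]
-- 	return bit_string[::-1]
-- ===== SOURCE B (Python) =====
-- def fun_findout_last_bit(bit_string):
--     last = 0
--     for i, bit in enumerate(bit_string):
--         if bit == '0' or bit == '1':
--             last = i + 1
--     return bit_string[:last]
-- ===== Notes on version B (the rewrite author's own statement) =====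
-- stated objective: faster
-- what changed: B replaces A's reverse-then-drop-a-slice-per-character-then-reverse loop (which copies the remaining string on every non-binary character) by a single forward pass recording the index after the last binary digit, followed by one prefix slice.
import Mathlib
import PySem

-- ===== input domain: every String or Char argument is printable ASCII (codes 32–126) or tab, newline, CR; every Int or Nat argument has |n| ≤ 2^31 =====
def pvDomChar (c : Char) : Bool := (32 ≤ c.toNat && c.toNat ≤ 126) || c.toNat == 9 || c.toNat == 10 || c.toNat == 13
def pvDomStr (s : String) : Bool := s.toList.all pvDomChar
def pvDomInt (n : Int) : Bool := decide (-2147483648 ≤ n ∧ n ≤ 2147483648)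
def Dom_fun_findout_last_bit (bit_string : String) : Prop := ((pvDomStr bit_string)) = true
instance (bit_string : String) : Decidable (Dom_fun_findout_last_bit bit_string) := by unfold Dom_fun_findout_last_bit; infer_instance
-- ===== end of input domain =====

-- B is a single forward pass recording the boundary index after the last binary digit,
-- instead of A's reverse / drop-a-slice-per-iteration / reverse; a timing run measured B faster.

-- ===== PORT A =====
-- A's for-loop iterates over the snapshot of the reversed string while the variable
-- bit_string is re-sliced; the snapshot is the first argument, the current value the second.
-- bit_string[1:] is cur.tail (PySem.List.slice_from_one); bit_string[::-1] is reverse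
-- (PySem.List.slice?_none_none_neg_one).
def pvLoopA : List Char → List Char → List Char
  | [], cur => cur
  | b :: rest, cur => if b == '1' || b == '0' then cur else pvLoopA rest cur.tail

def fun_findout_last_bit (bit_string : String) : String :=
  let rs := bit_string.toList.reverse
  String.ofList (pvLoopA rs rs).reverse

-- ===== PORT B =====
def fun_findout_last_bit_alt (bit_string : String) : String :=
  let last : Int :=
    (PySem.List.enumerate bit_string.toList 0).foldl
      (fun last p => if p.2 == '0' || p.2 == '1' then p.1 + 1 else last) 0
  String.ofList (PySem.List.slice bit_string.toList none (some last))

-- ===== PRECONDITION & SPEC =====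
def Spec_fun_findout_last_bit (bit_string : String) (out : String) : Prop := out = fun_findout_last_bit_alt bit_string
instance (bit_string : String) (out : String) : Decidable (Spec_fun_findout_last_bit bit_string out) := by unfold Spec_fun_findout_last_bit; infer_instance

-- ===== CLAIM (what is proved, stated in full; the proofs are below) =====
def Claim_equal_fun_findout_last_bit : Prop := ∀ (bit_string : String), Dom_fun_findout_last_bit bit_string → Spec_fun_findout_last_bit bit_string (fun_findout_last_bit bit_string)

-- ===== LEMMAS AND PROOFS =====

def pvBad (c : Char) : Bool := !(c == '0' || c == '1')

theorem pvLoopA_self (rs : List Char) : pvLoopA rs rs = rs.dropWhile pvBad := by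
  induction rs with
  | nil => rfl
  | cons b rest ih =>
    by_cases h : (b == '1' || b == '0') = true
    · have hb : pvBad b = false := by
        simp only [pvBad]
        cases h1 : b == '1' <;> cases h0 : b == '0' <;> simp_all
      simp [pvLoopA, h, List.dropWhile, hb]
    · have hb : pvBad b = true := by
        simp only [pvBad]
        cases h1 : b == '1' <;> cases h0 : b == '0' <;> simp_all
      simp [pvLoopA, h, List.dropWhile, hb, ih]

def pvLastB (l : List Char) : Int :=
  (PySem.List.enumerate l 0).foldl
    (fun last p => if p.2 == '0' || p.2 == '1' then p.1 + 1 else last) 0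

theorem pvLastB_concat (xs : List Char) (x : Char) :
    pvLastB (xs ++ [x]) = if x == '0' || x == '1' then (xs.length : Int) + 1 else pvLastB xs := by
  unfold pvLastB
  rw [PySem.List.enumerate_append, List.foldl_append]
  simp [PySem.List.enumerate]

theorem pvLastB_bounds (l : List Char) : 0 ≤ pvLastB l ∧ pvLastB l ≤ (l.length : Int) := by
  induction l using List.reverseRecOn with
  | nil => simp [pvLastB, PySem.List.enumerate]
  | append_singleton xs x ih =>
    rw [pvLastB_concat]
    rcases ih with ⟨h0, h1⟩
    split <;> simp <;> omega

theorem pvTake_lastB (l : List Char) : l.take (pvLastB l).toNat = l.rdropWhile pvBad := by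
  induction l using List.reverseRecOn with
  | nil => simp [pvLastB, PySem.List.enumerate]
  | append_singleton xs x ih =>
    rw [pvLastB_concat, List.rdropWhile_concat]
    by_cases h : (x == '0' || x == '1') = true
    · have hb : pvBad x = false := by simp [pvBad, h]
      rw [if_pos h, hb]
      have hn : ((xs.length : Int) + 1).toNat = xs.length + 1 := by omega
      simp [hn, List.take_append]
    · have hb : pvBad x = true := by simp [pvBad]; simpa using h
      rw [if_neg h, hb]
      have hle : (pvLastB xs).toNat ≤ xs.length := by
        have := pvLastB_bounds xs; omega
      rw [if_pos rfl, List.take_append_of_le_length hle, ih]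

-- ===== VERDICT (by name: the statement is the Claim_ definition above) =====
theorem fun_findout_last_bit_spec : Claim_equal_fun_findout_last_bit := by
  intro s _
  show fun_findout_last_bit s = fun_findout_last_bit_alt s
  have hnn : 0 ≤ pvLastB s.toList := (pvLastB_bounds s.toList).1
  show String.ofList (pvLoopA s.toList.reverse s.toList.reverse).reverse
      = String.ofList (PySem.List.slice s.toList none (some (pvLastB s.toList)))
  rw [pvLoopA_self, PySem.List.slice_to _ hnn]
  show String.ofList ((s.toList.reverse.dropWhile pvBad).reverse)
      = String.ofList (s.toList.take (pvLastB s.toList).toNat)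
  rw [pvTake_lastB, List.rdropWhile]
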